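-- pv_equiv track=rewrite | github.com/natquinson-cmd/kairos-insider | worker/build-eu-13d-index.py | is_non_us_target
-- ===== SOURCE A (Python) =====
-- NON_US_SUFFIXES = (
--     'PLC', 'AB', 'AG', 'NV', 'SE', 'SA', 'S/A', 'SPA', 'S A', 'OYJ', 'ASA',
--     'SP/F', 'AB (PUBL)', 'PUBL', 'KGAA', 'GMBH', 'LIMITADA',
-- )
--
-- def is_non_us_target(name):
--     if not name:
--         return False
--     upper = name.upper().strip()
--     for s in NON_US_SUFFIXES:
--         if upper.endswith(' ' + s) or upper.endswith('/' + s):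
--             return True
--     return False
-- ===== SOURCE B (Python) =====
-- NON_US_SUFFIXES = (
--     'PLC', 'AB', 'AG', 'NV', 'SE', 'SA', 'S/A', 'SPA', 'S A', 'OYJ', 'ASA',
--     'SP/F', 'AB (PUBL)', 'PUBL', 'KGAA', 'GMBH', 'LIMITADA',
-- )
--
-- _SUFFIX_SET = frozenset(NON_US_SUFFIXES)
--
-- def is_non_us_target(name):
--     if not name:
--         return False
--     upper = name.upper().strip()
--     # scan separator positions once instead of looping over every suffix:
--     return any(ch in ' /' and upper[i + 1:] in _SUFFIX_SET
--                for i, ch in enumerate(upper))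
-- ===== Notes on version B (the rewrite author's own statement) =====
-- stated objective: idiomatic
-- what changed: Instead of looping over all 17 suffixes and calling endswith twice per suffix, B scans the string once for separator positions (' ' or '/') and checks each tail for membership in a precomputed frozenset of suffixes.
import Mathlib
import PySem

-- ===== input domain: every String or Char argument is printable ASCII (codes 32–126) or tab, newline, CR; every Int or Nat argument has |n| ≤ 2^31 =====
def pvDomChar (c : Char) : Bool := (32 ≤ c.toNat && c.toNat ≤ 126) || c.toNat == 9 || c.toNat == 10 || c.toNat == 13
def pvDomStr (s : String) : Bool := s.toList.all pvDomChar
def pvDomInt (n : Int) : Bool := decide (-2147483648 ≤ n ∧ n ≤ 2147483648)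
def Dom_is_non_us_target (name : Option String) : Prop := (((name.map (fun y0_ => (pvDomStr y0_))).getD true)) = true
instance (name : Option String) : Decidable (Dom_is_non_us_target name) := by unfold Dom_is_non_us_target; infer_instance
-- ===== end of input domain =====

-- B replaces the per-suffix endswith loop by a single scan over the separator
-- positions of the string, checking each tail against a set of suffixes (idiomatic).

-- ===== PORT A =====
def nonUsSuffixes : List (List Char) :=
  ["PLC".toList, "AB".toList, "AG".toList, "NV".toList, "SE".toList, "SA".toList,
   "S/A".toList, "SPA".toList, "S A".toList, "OYJ".toList, "ASA".toList,
   "SP/F".toList, "AB (PUBL)".toList, "PUBL".toList, "KGAA".toList, "GMBH".toList,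
   "LIMITADA".toList]

-- the for-loop with early return over NON_US_SUFFIXES
def isNonUsLoop (upper : List Char) : List (List Char) → Bool
  | [] => false
  | s :: rest =>
      if PySem.Chars.endswith upper (' ' :: s) || PySem.Chars.endswith upper ('/' :: s) then
        true
      else isNonUsLoop upper rest

def is_non_us_target (name : Option String) : Bool :=
  match name with
  | none => false
  | some s =>
    if s.toList.isEmpty then false
    else isNonUsLoop (PySem.Chars.strip (PySem.Chars.upper s.toList)) nonUsSuffixes

-- ===== PORT B =====
def nonUsSuffixSet : PySem.Set (List Char) := PySem.Set.ofList nonUsSuffixes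

def is_non_us_target_alt (name : Option String) : Bool :=
  match name with
  | none => false
  | some s =>
    if s.toList.isEmpty then false
    else
      let upper := PySem.Chars.strip (PySem.Chars.upper s.toList)
      (PySem.List.enumerate upper).any (fun p =>
        (p.2 == ' ' || p.2 == '/') &&
          nonUsSuffixSet.contains (PySem.Chars.slice upper (some (p.1 + 1)) none))

-- ===== PRECONDITION & SPEC =====
def Spec_is_non_us_target (name : Option String) (out : Bool) : Prop := out = is_non_us_target_alt name
instance (name : Option String) (out : Bool) : Decidable (Spec_is_non_us_target name out) := by unfold Spec_is_non_us_target; infer_instance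

-- ===== CLAIM (what is proved, stated in full; the proofs are below) =====
def Claim_equal_is_non_us_target : Prop := ∀ (name : Option String), Dom_is_non_us_target name → Spec_is_non_us_target name (is_non_us_target name)

-- ===== LEMMAS AND PROOFS =====

-- the early-return loop is List.any
theorem isNonUsLoop_eq_any (up : List Char) (L : List (List Char)) :
    isNonUsLoop up L =
      L.any (fun s => PySem.Chars.endswith up (' ' :: s) || PySem.Chars.endswith up ('/' :: s)) := by
  induction L with
  | nil => rfl
  | cons s rest ih =>
      cases h : (PySem.Chars.endswith up (' ' :: s) || PySem.Chars.endswith up ('/' :: s)) <;>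
        simp [isNonUsLoop, h, ih]

-- a nonempty suffix (c :: s) of up is exactly a position i holding c whose tail is s
theorem cons_suffix_iff (c : Char) (s up : List Char) :
    (c :: s) <:+ up ↔ ∃ i, ∃ _ : i < up.length, up[i] = c ∧ up.drop (i + 1) = s := by
  constructor
  · rintro ⟨t, rfl⟩
    refine ⟨t.length, by simp, ?_, ?_⟩
    · simp
    · simp [List.drop_append]
  · rintro ⟨i, h, hc, hd⟩
    refine ⟨up.take i, ?_⟩
    conv_rhs => rw [← List.take_append_drop i up, ← List.getElem_cons_drop h]
    rw [hc, hd]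

-- upper[i+1:] for a nonnegative index is List.drop (i+1)
theorem slice_succ (up : List Char) (i : Nat) :
    PySem.List.slice up (some ((i : Int) + 1)) = up.drop (i + 1) := by
  rw [PySem.List.slice_from up (by positivity)]
  norm_num

-- core equivalence on an arbitrary string of characters
theorem core_eq (up : List Char) :
    isNonUsLoop up nonUsSuffixes =
      (PySem.List.enumerate up).any (fun p =>
        (p.2 == ' ' || p.2 == '/') &&
          nonUsSuffixSet.contains (PySem.Chars.slice up (some (p.1 + 1)) none)) := by
  rw [isNonUsLoop_eq_any, Bool.eq_iff_iff]
  simp only [List.any_eq_true, Bool.or_eq_true, PySem.Chars.endswith_iff, cons_suffix_iff,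
    PySem.List.mem_enumerate_iff, Bool.and_eq_true, beq_iff_eq]
  constructor
  · rintro ⟨s, hs, ⟨i, hi, hc, hd⟩ | ⟨i, hi, hc, hd⟩⟩ <;>
      exact ⟨((i : Int), up[i]), ⟨i, hi, by simp⟩, by simp [hc],
        by simp [slice_succ, hd, nonUsSuffixSet, PySem.Set.contains, PySem.Set.mem_ofList, hs]⟩
  · rintro ⟨p, ⟨k, hk, rfl⟩, hc, hmem⟩
    rw [show (0 : Int) + (k : Int) = (k : Int) by ring] at hmem
    rw [PySem.Chars.slice_eq_listSlice, slice_succ] at hmem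
    have hs : up.drop (k + 1) ∈ nonUsSuffixes := by
      have := (PySem.Set.mem_ofList nonUsSuffixes (up.drop (k + 1))).mp
      simp only [nonUsSuffixSet, PySem.Set.contains] at hmem
      exact this (by simpa using hmem)
    refine ⟨up.drop (k + 1), hs, ?_⟩
    rcases hc with hc | hc
    · exact Or.inl ⟨k, hk, hc, rfl⟩
    · exact Or.inr ⟨k, hk, hc, rfl⟩

-- ===== VERDICT (by name: the statement is the Claim_ definition above) =====
theorem is_non_us_target_spec : Claim_equal_is_non_us_target := by
  intro name _
  unfold Spec_is_non_us_target is_non_us_target is_non_us_target_alt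
  cases name with
  | none => rfl
  | some s =>
      cases h : s.toList.isEmpty <;> simp [h, core_eq]
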